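-- pv_equiv track=rewrite | github.com/BritishGeologicalSurvey/CoreScore | createMaskJson.py | getMinShape
-- ===== SOURCE A (Python) =====
-- def getMinShape(shape):
--     '''Get minimum value in shape -
--     essentially a helper function for the translation'''
--     minX = None
--     minY = None
--     for value in shape:
--         if minX is None:
--             minX = value[0]
--             minY = value[1]
--         elif minX > value[0]:
--             minX = value[0]
--             if minY > value[1]:
--                 minY = value[1]
--         elif minY > value[1]:
--             minY = value[1]
--         else:
--             pass
--     return (minX, minY)
-- ===== SOURCE B (Python) =====
-- def getMinShape(shape):
--     '''Get minimum value in shape -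
--     essentially a helper function for the translation'''
--     pts = list(shape)
--     if not pts:
--         return (None, None)
--     xs, ys = zip(*pts)
--     return (min(xs), min(ys))
-- ===== Notes on version B (the rewrite author's own statement) =====
-- stated objective: simpler
-- what changed: Replaces A's row-wise loop maintaining two running minima through a four-way branch with a column-wise decomposition: transpose via zip(*pts) and take min() of each coordinate axis.
-- outside the precondition, e.g. on getMinShape([]): A returns (None, None), B returns (None, None)
import Mathlib
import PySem

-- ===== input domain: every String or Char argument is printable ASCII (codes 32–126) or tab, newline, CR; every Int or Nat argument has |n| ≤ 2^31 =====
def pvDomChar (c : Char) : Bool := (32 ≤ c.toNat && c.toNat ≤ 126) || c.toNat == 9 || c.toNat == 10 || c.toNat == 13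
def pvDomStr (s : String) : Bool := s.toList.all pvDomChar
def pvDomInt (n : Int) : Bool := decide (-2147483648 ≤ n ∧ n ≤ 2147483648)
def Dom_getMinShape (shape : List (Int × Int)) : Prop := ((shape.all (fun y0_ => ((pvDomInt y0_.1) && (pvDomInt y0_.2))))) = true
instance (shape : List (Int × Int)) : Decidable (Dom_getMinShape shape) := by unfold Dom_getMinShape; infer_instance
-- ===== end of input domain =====

-- B replaces A's row-wise loop with two running minima by a transpose (zip(*pts)) and
-- an independent min() over each coordinate column; return value only, no side effects.

-- ===== PORT A =====
-- one loop step of A: state is (minX, minY) as Options (None at the start)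
def getMinShapeStep (st : Option Int × Option Int) (value : Int × Int) : Option Int × Option Int :=
  match st with
  | (none, _) => (some value.1, some value.2)
  | (some mx, some my) =>
      if mx > value.1 then
        (some value.1, if my > value.2 then some value.2 else some my)
      else if my > value.2 then (some mx, some value.2)
      else (some mx, some my)
  | (some mx, none) => (some mx, none)  -- unreachable: minY is set whenever minX is

def getMinShape (shape : List (Int × Int)) : Int × Int :=
  let st := shape.foldl getMinShapeStep (none, none)
  -- Python returns (None, None) on the empty shape; Pre_ excludes it, default 0 stands for None
  (st.1.getD 0, st.2.getD 0)

-- ===== PORT B =====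
def getMinShape_alt (shape : List (Int × Int)) : Int × Int :=
  match shape with
  | [] => (0, 0)  -- Python B returns (None, None) here; excluded by Pre_
  | _ :: _ =>
      ((PySem.List.min? (shape.map Prod.fst) (fun x => x)).getD 0,
       (PySem.List.min? (shape.map Prod.snd) (fun x => x)).getD 0)

-- ===== PRECONDITION & SPEC =====
-- Pre_ excludes only the empty list, where both Pythons return (None, None) — not a value of Int × Int.
def Pre_getMinShape (shape : List (Int × Int)) : Prop := shape ≠ []
instance (shape : List (Int × Int)) : Decidable (Pre_getMinShape shape) := by unfold Pre_getMinShape; infer_instance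

def pvWitness_getMinShape : (List (Int × Int)) := [(3, 5), (1, 9)]

def Spec_getMinShape (shape : List (Int × Int)) (out : Int × Int) : Prop := out = getMinShape_alt shape
instance (shape : List (Int × Int)) (out : Int × Int) : Decidable (Spec_getMinShape shape out) := by unfold Spec_getMinShape; infer_instance

-- ===== CLAIM (what is proved, stated in full; the proofs are below) =====
def Claim_equal_getMinShape : Prop := ∀ (shape : List (Int × Int)), Dom_getMinShape shape → Pre_getMinShape shape → Spec_getMinShape shape (getMinShape shape)

-- ===== LEMMAS AND PROOFS =====

-- A's loop, once started, maintains exactly the two running minima.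
theorem getMinShapeStep_some (mx my : Int) (l : List (Int × Int)) :
    l.foldl getMinShapeStep (some mx, some my)
      = (some ((l.map Prod.fst).foldl min mx), some ((l.map Prod.snd).foldl min my)) := by
  induction l generalizing mx my with
  | nil => simp
  | cons p t ih =>
      simp only [List.foldl, List.map, getMinShapeStep]
      split_ifs with h1 h2 h3 <;> rw [ih] <;>
        refine Prod.ext ?_ ?_ <;> simp only [Option.some.injEq] <;> congr 1 <;> omega

-- ===== VERDICT (by name: the statement is the Claim_ definition above) =====
theorem getMinShape_spec : Claim_equal_getMinShape := by
  intro shape _ hpre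
  unfold Spec_getMinShape getMinShape getMinShape_alt
  match shape with
  | [] => exact absurd rfl hpre
  | p :: t =>
      simp only [List.foldl, List.map, getMinShapeStep, getMinShapeStep_some,
        PySem.List.min?_id_cons, Option.getD_some]
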